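-- pv_equiv track=rewrite | github.com/openstack/pyeclib | pyeclib/core.py | _validate_and_return_fragment_size
-- ===== SOURCE A (Python) =====
-- def _validate_and_return_fragment_size(fragments):
--     if len(fragments) == 0 or len(fragments[0]) == 0:
--         return -1
--     fragment_len = len(fragments[0])
--     for fragment in fragments[1:]:
--         if len(fragment) != fragment_len:
--             return -1
--     return fragment_len
-- ===== SOURCE B (Python) =====
-- def _validate_and_return_fragment_size(fragments):
--     lengths = {len(f) for f in fragments}
--     if len(lengths) != 1:
--         return -1
--     v = lengths.pop()  # singleton set: the popped value is determined
--     return -1 if v == 0 else v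
-- ===== Notes on version B (the rewrite author's own statement) =====
-- stated objective: simpler
-- what changed: Replaces the early-exit loop comparing each fragment to the first with a set comprehension of all lengths plus a cardinality-1 test (empty input and mismatches both fall out of the same test).
import Mathlib
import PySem

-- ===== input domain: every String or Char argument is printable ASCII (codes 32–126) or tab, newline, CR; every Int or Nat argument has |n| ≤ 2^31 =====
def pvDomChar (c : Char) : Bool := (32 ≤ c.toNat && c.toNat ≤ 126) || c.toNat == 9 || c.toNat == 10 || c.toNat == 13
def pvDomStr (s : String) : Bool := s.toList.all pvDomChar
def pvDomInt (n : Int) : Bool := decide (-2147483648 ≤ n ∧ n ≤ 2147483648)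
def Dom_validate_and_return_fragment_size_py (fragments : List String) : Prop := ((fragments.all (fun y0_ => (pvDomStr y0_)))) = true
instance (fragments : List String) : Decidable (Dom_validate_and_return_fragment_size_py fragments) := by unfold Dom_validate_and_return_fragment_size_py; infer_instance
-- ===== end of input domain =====

-- B: set-of-lengths with a cardinality-1 test instead of A's early-exit loop against the first length (simpler; return value only, no side effects).
-- ===== PORT A =====
-- the 'for fragment in fragments[1:]' loop with its early 'return -1'
def vA_loop (fragment_len : Int) : List String → Int
  | [] => fragment_len
  | fragment :: rest =>
    if PySem.Str.len fragment ≠ fragment_len then -1 else vA_loop fragment_len rest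

def validate_and_return_fragment_size_py (fragments : List String) : Int :=
  match fragments with
  | [] => -1                       -- len(fragments) == 0
  | f :: rest =>                   -- fragments[0] = f, fragments[1:] = rest
    if PySem.Str.len f = 0 then -1
    else vA_loop (PySem.Str.len f) rest

-- ===== PORT B =====
def validate_and_return_fragment_size_py_alt (fragments : List String) : Int :=
  let lengths : PySem.Set Int := PySem.Set.ofList (fragments.map PySem.Str.len)
  if PySem.Set.len lengths ≠ 1 then -1
  else
    -- lengths.pop() on a singleton set: order-independent, the unique element
    let v := lengths.headD 0
    if v = 0 then -1 else v

-- ===== PRECONDITION & SPEC =====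
def Spec_validate_and_return_fragment_size_py (fragments : List String) (out : Int) : Prop := out = validate_and_return_fragment_size_py_alt fragments
instance (fragments : List String) (out : Int) : Decidable (Spec_validate_and_return_fragment_size_py fragments out) := by unfold Spec_validate_and_return_fragment_size_py; infer_instance

-- ===== CLAIM (what is proved, stated in full; the proofs are below) =====
def Claim_equal_validate_and_return_fragment_size_py : Prop := ∀ (fragments : List String), Dom_validate_and_return_fragment_size_py fragments → Spec_validate_and_return_fragment_size_py fragments (validate_and_return_fragment_size_py fragments)

-- ===== LEMMAS AND PROOFS =====

lemma vA_loop_all (n : Int) (l : List String) (h : ∀ x ∈ l, PySem.Str.len x = n) :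
    vA_loop n l = n := by
  induction l with
  | nil => rfl
  | cons f rest ih =>
    rw [vA_loop, if_neg (not_not.mpr (h f (by simp)))]
    exact ih (fun x hx => h x (List.mem_cons_of_mem _ hx))

lemma vA_loop_ne (n : Int) (l : List String) (h : ∃ x ∈ l, PySem.Str.len x ≠ n) :
    vA_loop n l = -1 := by
  induction l with
  | nil => simp at h
  | cons f rest ih =>
    rcases h with ⟨x, hx, hxn⟩
    rw [vA_loop]
    by_cases hf : PySem.Str.len f = n
    · rw [if_neg (not_not.mpr hf)]
      apply ih
      rcases List.mem_cons.mp hx with rfl | hx'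
      · exact absurd hf hxn
      · exact ⟨x, hx', hxn⟩
    · rw [if_pos hf]

lemma discard_eq_nil_iff {α : Type} [BEq α] [LawfulBEq α] (s : PySem.Set α) (a : α) :
    PySem.Set.discard s a = [] ↔ ∀ y ∈ s, y = a := by
  rw [List.eq_nil_iff_forall_not_mem]
  constructor
  · intro h y hy
    by_contra hne
    exact h y ((PySem.Set.mem_discard _ _ _).mpr ⟨hy, hne⟩)
  · intro h y hy
    rcases (PySem.Set.mem_discard _ _ _).mp hy with ⟨hys, hne⟩
    exact hne (h y hys)

theorem validate_and_return_fragment_size_py_spec : Claim_equal_validate_and_return_fragment_size_py := by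
  intro fragments _
  unfold Spec_validate_and_return_fragment_size_py
  cases fragments with
  | nil => rfl
  | cons f rest =>
    show validate_and_return_fragment_size_py (f :: rest)
        = validate_and_return_fragment_size_py_alt (f :: rest)
    simp only [validate_and_return_fragment_size_py_alt, List.map,
      PySem.Set.ofList_cons, PySem.Set.len]
    by_cases hall : ∀ x ∈ rest, PySem.Str.len x = PySem.Str.len f
    · have hd : PySem.Set.discard (PySem.Set.ofList (rest.map PySem.Str.len)) (PySem.Str.len f) = [] := by
        rw [discard_eq_nil_iff]
        intro y hy
        rcases List.mem_map.mp ((PySem.Set.mem_ofList _ _).mp hy) with ⟨x, hx, rfl⟩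
        exact hall x hx
      rw [hd]
      by_cases h0 : f = ""
      · subst h0
        simp [validate_and_return_fragment_size_py]
      · have hloop := vA_loop_all (PySem.Str.len f) rest hall
        simp at hloop
        simp [validate_and_return_fragment_size_py, h0]
        exact hloop
    · push Not at hall
      rcases hall with ⟨x, hx, hxn⟩
      have hd : PySem.Set.discard (PySem.Set.ofList (rest.map PySem.Str.len)) (PySem.Str.len f) ≠ [] := by
        rw [Ne, List.eq_nil_iff_forall_not_mem]
        push Not
        exact ⟨PySem.Str.len x, (PySem.Set.mem_discard _ _ _).mpr
          ⟨(PySem.Set.mem_ofList _ _).mpr (List.mem_map_of_mem hx), hxn⟩⟩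
      have hlen : ((PySem.Str.len f ::
          PySem.Set.discard (PySem.Set.ofList (rest.map PySem.Str.len)) (PySem.Str.len f)).length : Int) ≠ 1 := by
        cases h : PySem.Set.discard (PySem.Set.ofList (rest.map PySem.Str.len)) (PySem.Str.len f) with
        | nil => exact absurd h hd
        | cons a t => simp only [List.length_cons]; push_cast; omega
      rw [if_pos hlen]
      simp only [validate_and_return_fragment_size_py]
      by_cases h0 : PySem.Str.len f = 0
      · rw [if_pos h0]
      · rw [if_neg h0, vA_loop_ne _ _ ⟨x, hx, hxn⟩]
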